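-- pv_equiv track=rewrite | github.com/chernistry/shafi | scripts/analysis/mine_within_doc_rerank_opportunities.py | _page_counts_by_doc
-- ===== SOURCE A (Python) =====
-- def _page_doc(page_id: str) -> str:
--     text = str(page_id).strip()
--     if "_" not in text:
--         return text
--     return text.rsplit("_", 1)[0]
--
-- def _page_counts_by_doc(page_ids: list[str]) -> dict[str, int]:
--     counts: dict[str, int] = {}
--     for page_id in page_ids:
--         doc_id = _page_doc(page_id)
--         if not doc_id:
--             continue
--         counts[doc_id] = counts.get(doc_id, 0) + 1
--     return counts
-- ===== SOURCE B (Python) =====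
-- def _page_doc(page_id: str) -> str:
--     text = str(page_id).strip()
--     if "_" not in text:
--         return text
--     return text.rsplit("_", 1)[0]
--
-- def _page_counts_by_doc(page_ids: list[str]) -> dict[str, int]:
--     docs = [d for d in map(_page_doc, page_ids) if d]
--     return {d: docs.count(d) for d in dict.fromkeys(docs)}
-- ===== Notes on version B (the rewrite author's own statement) =====
-- stated objective: simpler
-- what changed: B replaces A's running hash-map tally loop with two declarative passes: build the filtered doc-id list, then a dict comprehension over its first occurrences counting each with list.count.
import Mathlib
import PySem

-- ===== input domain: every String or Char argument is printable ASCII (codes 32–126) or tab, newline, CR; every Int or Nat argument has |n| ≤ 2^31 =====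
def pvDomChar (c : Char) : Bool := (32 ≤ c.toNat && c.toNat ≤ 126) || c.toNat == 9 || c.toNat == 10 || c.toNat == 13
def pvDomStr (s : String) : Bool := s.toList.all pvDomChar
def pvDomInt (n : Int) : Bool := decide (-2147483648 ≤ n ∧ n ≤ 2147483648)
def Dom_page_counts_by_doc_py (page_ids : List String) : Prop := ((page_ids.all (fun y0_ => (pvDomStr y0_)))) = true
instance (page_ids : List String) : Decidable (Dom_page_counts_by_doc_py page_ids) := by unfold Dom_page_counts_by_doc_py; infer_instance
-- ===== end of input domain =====

-- B: simpler decomposition — build the filtered doc-id list, then count each first-occurrence doc id with list.count, instead of A's running dict tally.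


-- ===== PORT A =====
-- _page_doc: strip, and if '_' occurs, drop everything from the last '_' on.
-- text.rsplit("_", 1)[0] with '_' in text is exactly text[:text.rfind("_")] (slice before the last '_').
def pageDoc (page_id : String) : String :=
  let text := PySem.Str.strip page_id
  if PySem.Str.isIn "_" text = false then text
  else PySem.Str.slice text none (some (PySem.Str.rfind text "_"))

def page_counts_by_doc_py (page_ids : List String) : List (String × Int) :=
  (page_ids.foldl
    (fun counts page_id =>
      if pageDoc page_id = "" then counts
      else counts.insert (pageDoc page_id) (counts.getD (pageDoc page_id) 0 + 1))
    (PySem.Dict.empty : PySem.Dict String Int)).items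

-- ===== PORT B =====
-- docs = [d for d in map(_page_doc, page_ids) if d]; {d: docs.count(d) for d in dict.fromkeys(docs)}
def page_counts_by_doc_py_alt (page_ids : List String) : List (String × Int) :=
  let docs := (page_ids.map pageDoc).filter (fun d => d ≠ "")
  (PySem.List.dedup docs).map (fun d => (d, (docs.count d : Int)))

-- ===== PRECONDITION & SPEC =====
def Spec_page_counts_by_doc_py (page_ids : List String) (out : List (String × Int)) : Prop := out = page_counts_by_doc_py_alt page_ids
instance (page_ids : List String) (out : List (String × Int)) : Decidable (Spec_page_counts_by_doc_py page_ids out) := by unfold Spec_page_counts_by_doc_py; infer_instance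

-- ===== CLAIM =====
def Claim_equal_page_counts_by_doc_py : Prop := ∀ (page_ids : List String), Dom_page_counts_by_doc_py page_ids → Spec_page_counts_by_doc_py page_ids (page_counts_by_doc_py page_ids)

-- ===== LEMMAS AND PROOFS =====
-- A's loop over page_ids is the counting loop over the filtered/mapped doc-id list.
theorem foldl_pageDoc_eq (page_ids : List String) (d : PySem.Dict String Int) :
    page_ids.foldl
      (fun counts page_id =>
        if pageDoc page_id = "" then counts
        else counts.insert (pageDoc page_id) (counts.getD (pageDoc page_id) 0 + 1)) d
    = ((page_ids.map pageDoc).filter (fun x => x ≠ "")).foldl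
        (fun counts x => counts.insert x (counts.getD x 0 + 1)) d := by
  induction page_ids generalizing d with
  | nil => simp only [List.foldl_nil, List.map_nil, List.filter_nil]
  | cons p ps ih =>
    rw [List.foldl_cons, List.map_cons, List.filter_cons]
    by_cases h : pageDoc p = ""
    · rw [if_pos h, ih]
      simp only [h, decide_not, decide_true, Bool.not_true, Bool.false_eq_true, if_false]
    · rw [if_neg h, ih]
      simp only [decide_not, h, decide_false, Bool.not_false, if_true, List.foldl_cons]

-- ===== VERDICT =====
theorem page_counts_by_doc_py_spec : Claim_equal_page_counts_by_doc_py := by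
  intro page_ids _
  unfold Spec_page_counts_by_doc_py page_counts_by_doc_py page_counts_by_doc_py_alt
  rw [foldl_pageDoc_eq, PySem.Dict.foldl_insert_getD_add_one_eq_counter,
      PySem.Dict.items_counter]
  simp only [PySem.List.dedup_eq_ofList]
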